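-- pv_equiv track=rewrite | github.com/sfc-gh-csmith/Unified_Snowspace_Complete_V1 | Contributor/streamlit/pages/02_Field_Transformer.py | delimiter_replacement_test
-- ===== SOURCE A (Python) =====
-- from typing import Dict, List, Any, Optional, Tuple
--
-- def delimiter_replacement_test(src_sample: Any, tgt_sample: Any, src_type: str, tgt_type: str) -> bool:
--     """Check for delimiter replacement patterns"""
--     delimiters = ['_', '-', '.', '|', ',', ';', ':', '/']
--     for d1 in delimiters:
--         for d2 in delimiters + [' ']:
--             if d1 != d2 and d1 in str(src_sample):
--                 if str(src_sample).replace(d1, d2) == str(tgt_sample):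
--                     return True
--     return False
-- ===== SOURCE B (Python) =====
-- def delimiter_replacement_test(src_sample, tgt_sample, src_type, tgt_type):
--     """Derive the single delimiter replacement from the character mismatches
--     instead of trying all 72 candidate (d1, d2) replacements."""
--     delimiters = ['_', '-', '.', '|', ',', ';', ':', '/']
--     s, t = str(src_sample), str(tgt_sample)
--     if len(s) != len(t):
--         return False
--     diffs = {(a, b) for a, b in zip(s, t) if a != b}
--     if len(diffs) != 1:
--         return False
--     (d1, d2), = diffs
--     if d1 not in delimiters or (d2 not in delimiters and d2 != ' '):
--         return False
--     return all(b == d2 for a, b in zip(s, t) if a == d1)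
-- ===== Notes on version B (the rewrite author's own statement) =====
-- stated objective: alternative
-- what changed: B derives the unique candidate (d1,d2) replacement pair from the set of per-position character mismatches in one zip pass, instead of A's trying all 72 delimiter pairs and re-running str.replace for each.
import Mathlib
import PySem

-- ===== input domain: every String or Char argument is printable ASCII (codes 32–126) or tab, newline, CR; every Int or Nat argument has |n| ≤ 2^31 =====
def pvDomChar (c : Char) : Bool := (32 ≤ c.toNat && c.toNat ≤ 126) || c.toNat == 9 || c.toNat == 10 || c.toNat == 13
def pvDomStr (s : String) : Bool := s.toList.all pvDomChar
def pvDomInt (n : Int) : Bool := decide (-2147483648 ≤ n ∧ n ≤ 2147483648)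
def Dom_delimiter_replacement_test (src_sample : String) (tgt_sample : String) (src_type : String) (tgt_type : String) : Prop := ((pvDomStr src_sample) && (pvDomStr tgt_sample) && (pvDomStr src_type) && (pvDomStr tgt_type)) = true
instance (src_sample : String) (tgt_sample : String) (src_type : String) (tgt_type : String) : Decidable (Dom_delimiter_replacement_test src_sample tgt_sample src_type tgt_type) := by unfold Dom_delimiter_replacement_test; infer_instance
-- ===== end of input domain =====

-- B derives the single candidate replacement pair from the per-position character mismatches in
-- one pass instead of trying all 72 delimiter pairs; the return values are proved identical.

-- ===== PORT A =====

def pvDelims : List Char := ['_', '-', '.', '|', ',', ';', ':', '/']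

def delimiter_replacement_test (src_sample : String) (tgt_sample : String) (src_type : String) (tgt_type : String) : Bool :=
  pvDelims.any (fun d1 =>
    (pvDelims ++ [' ']).any (fun d2 =>
      (d1 != d2 && PySem.Str.isIn (String.ofList [d1]) src_sample) &&
        (PySem.Str.replace src_sample (String.ofList [d1]) (String.ofList [d2]) == tgt_sample)))

-- ===== PORT B =====
def pvDelimsB : List Char := ['_', '-', '.', '|', ',', ';', ':', '/']

def delimiter_replacement_test_alt (src_sample : String) (tgt_sample : String) (src_type : String) (tgt_type : String) : Bool :=
  let s := src_sample.toList
  let t := tgt_sample.toList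
  if s.length != t.length then false
  else
    let diffs : PySem.Set (Char × Char) := PySem.Set.ofList ((s.zip t).filter (fun p => p.1 != p.2))
    match diffs with
    | [(d1, d2)] =>
      if !(pvDelimsB.contains d1) || (!(pvDelimsB.contains d2) && d2 != ' ') then false
      else ((s.zip t).filter (fun p => p.1 == d1)).all (fun p => p.2 == d2)
    | _ => false


-- ===== PRECONDITION & SPEC =====
def Spec_delimiter_replacement_test (src_sample : String) (tgt_sample : String) (src_type : String) (tgt_type : String) (out : Bool) : Prop := out = delimiter_replacement_test_alt src_sample tgt_sample src_type tgt_type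
instance (src_sample : String) (tgt_sample : String) (src_type : String) (tgt_type : String) (out : Bool) : Decidable (Spec_delimiter_replacement_test src_sample tgt_sample src_type tgt_type out) := by unfold Spec_delimiter_replacement_test; infer_instance

-- ===== CLAIM (what is proved, stated in full; the proofs are below) =====
def Claim_equal_delimiter_replacement_test : Prop := ∀ (src_sample : String) (tgt_sample : String) (src_type : String) (tgt_type : String), Dom_delimiter_replacement_test src_sample tgt_sample src_type tgt_type → Spec_delimiter_replacement_test src_sample tgt_sample src_type tgt_type (delimiter_replacement_test src_sample tgt_sample src_type tgt_type)

-- ===== LEMMAS AND PROOFS =====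

-- the character map performed by str.replace(d1, d2) for single characters

def pvRep (d1 d2 c : Char) : Char := if c = d1 then d2 else c

theorem replace_go_single (d1 d2 : Char) :
    ∀ (l : List Char) (fuel : Nat) (acc : List Char), l.length ≤ fuel →
      PySem.Chars.replace.go [d1] [d2] fuel l acc
        = acc.reverse ++ l.map (pvRep d1 d2) := by
  intro l
  induction l with
  | nil =>
    intro fuel acc _
    cases fuel <;> simp [PySem.Chars.replace.go]
  | cons c t ih =>
    intro fuel acc h
    cases fuel with
    | zero => simp at h
    | succ n =>
      have hlen : t.length ≤ n := by simpa using h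
      rw [PySem.Chars.replace.go]
      by_cases hc : c = d1
      · subst hc
        have hp : List.isPrefixOf [c] (c :: t) = true := by simp [List.isPrefixOf]
        rw [if_pos hp]
        simp only [List.length_cons, List.length_nil, List.drop_succ_cons, List.drop_zero]
        rw [ih n ([d2].reverse ++ acc) hlen]
        simp [pvRep]
      · have hnp : List.isPrefixOf [d1] (c :: t) = false := by
          simp [List.isPrefixOf]
          exact fun h' => absurd h'.symm hc
        rw [if_neg (by simp [hnp])]
        rw [ih n (c :: acc) hlen]
        simp [pvRep, hc]

theorem replace_single (s : List Char) (d1 d2 : Char) :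
    PySem.Chars.replace s [d1] [d2] = s.map (pvRep d1 d2) := by
  rw [PySem.Chars.replace]
  rw [if_neg (by simp)]
  simpa using replace_go_single d1 d2 s s.length [] (le_refl _)

theorem singleton_infix_iff {a : Char} {l : List Char} : [a] <:+: l ↔ a ∈ l := by
  constructor
  · rintro ⟨p, q, rfl⟩; simp
  · intro h
    obtain ⟨p, q, rfl⟩ := List.append_of_mem h
    exact ⟨p, q, by simp⟩

theorem foldl_add_const {α : Type} [BEq α] [LawfulBEq α] (v : α) :
    ∀ l : List α, (∀ x ∈ l, x = v) → l.foldl PySem.Set.add [v] = [v] := by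
  intro l
  induction l with
  | nil => intro _; rfl
  | cons y ys ih =>
    intro hall
    have hy : y = v := hall y (by simp)
    subst hy
    have : PySem.Set.add [y] y = [y] := by simp [PySem.Set.add, PySem.Set.contains]
    rw [List.foldl_cons, this]
    exact ih (fun x hx => hall x (by simp [hx]))

theorem ofList_const {α : Type} [BEq α] [LawfulBEq α] (l : List α) (v : α)
    (hne : l ≠ []) (hall : ∀ x ∈ l, x = v) : PySem.Set.ofList l = [v] := by
  cases l with
  | nil => exact absurd rfl hne
  | cons x xs =>
    have hx : x = v := hall x (by simp)
    subst hx
    have h1 : PySem.Set.ofList (x :: xs) = xs.foldl PySem.Set.add [x] := by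
      simp [PySem.Set.ofList_eq_foldl, PySem.Set.add, PySem.Set.empty, PySem.Set.contains]
    rw [h1]
    exact foldl_add_const x xs (fun y hy => hall y (by simp [hy]))

theorem map_of_zip (s t : List Char) (f : Char → Char) (hlen : s.length = t.length)
    (h : ∀ p ∈ s.zip t, p.2 = f p.1) : t = s.map f := by
  induction s generalizing t with
  | nil => cases t with
    | nil => rfl
    | cons b t' => simp at hlen
  | cons a s' ih =>
    cases t with
    | nil => simp at hlen
    | cons b t' =>
      have hb : b = f a := h (a, b) (by simp)
      have := ih t' (by simpa using hlen) (fun p hp => h p (by simp [hp]))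
      simp [hb, this]

-- the shared characterization
def pvP (s t : List Char) : Prop :=
  ∃ d1 d2, d1 ∈ pvDelims ∧ (d2 ∈ pvDelims ∨ d2 = ' ') ∧ d1 ≠ d2 ∧ d1 ∈ s ∧ t = s.map (pvRep d1 d2)

theorem A_iff (src tgt a b : String) :
    delimiter_replacement_test src tgt a b = true ↔ pvP src.toList tgt.toList := by
  unfold delimiter_replacement_test pvP
  simp only [List.any_eq_true, Bool.and_eq_true, bne_iff_ne, ne_eq, beq_iff_eq]
  constructor
  · rintro ⟨d1, hd1, d2, hd2, ⟨hne, hin⟩, heq⟩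
    refine ⟨d1, d2, hd1, by simpa using hd2, hne, ?_, ?_⟩
    · have := (PySem.Str.isIn_iff_infix _ _).mp hin
      rw [String.toList_ofList] at this
      exact singleton_infix_iff.mp this
    · have h2 : (PySem.Str.replace src (String.ofList [d1]) (String.ofList [d2])).toList = tgt.toList := by
        rw [heq]
      rw [PySem.Str.toList_replace, String.toList_ofList, String.toList_ofList,
        replace_single] at h2
      exact h2.symm
  · rintro ⟨d1, d2, hd1, hd2, hne, hmem, hmap⟩
    refine ⟨d1, hd1, d2, by simpa using hd2, ⟨hne, ?_⟩, ?_⟩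
    · exact (PySem.Str.isIn_iff_infix _ _).mpr (by rw [String.toList_ofList]; exact singleton_infix_iff.mpr hmem)
    · apply String.toList_inj.mp
      rw [PySem.Str.toList_replace, String.toList_ofList, String.toList_ofList, replace_single]
      exact hmap.symm

theorem B_iff (src tgt a b : String) :
    delimiter_replacement_test_alt src tgt a b = true ↔ pvP src.toList tgt.toList := by
  unfold delimiter_replacement_test_alt
  simp only [show pvDelimsB = pvDelims from rfl]
  set s := src.toList with hs
  set t := tgt.toList with ht
  by_cases hlen : s.length = t.length
  · rw [if_neg (by simp [hlen])]
    constructor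
    · intro hB
      -- analyze the match
      rcases hdiffs : PySem.Set.ofList ((s.zip t).filter (fun p => p.1 != p.2)) with _ | ⟨⟨d1, d2⟩, rest⟩
      · rw [hdiffs] at hB; simp at hB
      · cases rest with
        | cons _ _ => rw [hdiffs] at hB; simp at hB
        | nil =>
          rw [hdiffs] at hB
          simp only [] at hB
          by_cases hguard : (!(pvDelims.contains d1) || (!(pvDelims.contains d2) && d2 != ' ')) = true
          · rw [if_pos hguard] at hB; simp at hB
          · rw [if_neg hguard] at hB
            have hgf : (!(pvDelims.contains d1) || (!(pvDelims.contains d2) && d2 != ' ')) = false :=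
              Bool.eq_false_iff.mpr hguard
            obtain ⟨h1, h2⟩ := Bool.or_eq_false_iff.mp hgf
            have hguard' : pvDelims.contains d1 = true ∧ (pvDelims.contains d2 = true ∨ d2 = ' ') := by
              refine ⟨by simpa using h1, ?_⟩
              rcases Bool.and_eq_false_iff.mp h2 with h' | h'
              · left; simpa using h'
              · right; simpa using h'
            have hmem1 : (d1, d2) ∈ (s.zip t).filter (fun p => p.1 != p.2) := by
              have : (d1, d2) ∈ PySem.Set.ofList ((s.zip t).filter (fun p => p.1 != p.2)) := by
                rw [hdiffs]; simp
              exact (PySem.Set.mem_ofList _ _).mp this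
            have hzip := List.mem_filter.mp hmem1
            have hne : d1 ≠ d2 := by simpa using hzip.2
            have hd1s : d1 ∈ s := (List.of_mem_zip hzip.1).1
            refine ⟨d1, d2, by simpa using hguard'.1, by
              rcases hguard'.2 with h | h
              · left; simpa using h
              · right; exact h, hne, hd1s, ?_⟩
            apply map_of_zip s t _ hlen
            rintro ⟨x, y⟩ hp
            by_cases hx : x = d1
            · subst hx
              have := List.all_eq_true.mp hB (x, y) (List.mem_filter.mpr ⟨hp, by simp⟩)
              simp only [beq_iff_eq] at this
              simp [pvRep, this]
            · by_cases hxy : x = y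
              · subst hxy
                simp [pvRep, hx]
              · exfalso
                have : (x, y) ∈ PySem.Set.ofList ((s.zip t).filter (fun p => p.1 != p.2)) :=
                  (PySem.Set.mem_ofList _ _).mpr (List.mem_filter.mpr ⟨hp, by simpa using hxy⟩)
                rw [hdiffs] at this
                simp at this
                exact hx this.1
    · rintro ⟨d1, d2, hd1, hd2, hne, hmem, hmap⟩
      -- compute diffs = [(d1,d2)]
      have hz : s.zip t = s.map (fun a => (a, pvRep d1 d2 a)) := by
        rw [hmap]
        have := List.zip_map' (f := id) (g := pvRep d1 d2) (l := s)
        simpa using this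
      have hfil : (s.zip t).filter (fun p => p.1 != p.2)
          = (s.filter (fun a => a == d1)).map (fun a => (a, pvRep d1 d2 a)) := by
        rw [hz, List.filter_map]
        congr 1
        apply List.filter_congr
        intro a _
        by_cases ha : a = d1
        · simp [Function.comp, pvRep, ha, hne]
        · simp [Function.comp, pvRep, ha]
      have hne' : (s.filter (fun a => a == d1)) ≠ [] := by
        simp only [ne_eq, List.filter_eq_nil_iff, not_forall]
        exact ⟨d1, hmem, by simp⟩
      have hdiffs : PySem.Set.ofList ((s.zip t).filter (fun p => p.1 != p.2)) = [(d1, d2)] := by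
        rw [hfil]
        apply ofList_const
        · simpa using hne'
        · rintro ⟨x, y⟩ hxy
          obtain ⟨a, ha, heq⟩ := List.mem_map.mp hxy
          have ha1 : a = d1 := by simpa using (List.mem_filter.mp ha).2
          subst ha1
          simp [pvRep] at heq
          simp [← heq.1, ← heq.2]
      rw [hdiffs]
      have hg : (!(pvDelims.contains d1) || (!(pvDelims.contains d2) && d2 != ' ')) = false := by
        have h1 : pvDelims.contains d1 = true := by simpa using hd1
        rcases hd2 with h | h
        · have h2 : pvDelims.contains d2 = true := by simpa using h
          rw [h1, h2]
          rfl
        · rw [h1, h]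
          decide
      show (if (!(pvDelims.contains d1) || (!(pvDelims.contains d2) && d2 != ' ')) = true then false
            else ((s.zip t).filter (fun p => p.1 == d1)).all (fun p => p.2 == d2)) = true
      rw [if_neg (Bool.eq_false_iff.mp hg)]
      apply List.all_eq_true.mpr
      rintro ⟨x, y⟩ hp
      have hmf := List.mem_filter.mp hp
      have hx : x = d1 := by simpa using hmf.2
      have hzm : (x, y) ∈ List.map (fun a => (a, pvRep d1 d2 a)) s := by
        rw [← hz]; exact hmf.1
      obtain ⟨a, _, heq⟩ := List.mem_map.mp hzm
      have ha : a = x := congrArg Prod.fst heq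
      have hy : pvRep d1 d2 a = y := congrArg Prod.snd heq
      show (y == d2) = true
      rw [← hy, ha, hx]
      simp [pvRep]
  · rw [if_pos (by simpa using hlen)]
    constructor
    · intro h; simp at h
    · rintro ⟨d1, d2, _, _, _, _, hmap⟩
      exfalso; apply hlen; rw [hmap]; simp

theorem ports_eq (src tgt a b : String) :
    delimiter_replacement_test src tgt a b = delimiter_replacement_test_alt src tgt a b := by
  apply Bool.coe_iff_coe.mp
  rw [A_iff, B_iff]

-- ===== VERDICT (by name: the statement is the Claim_ definition above) =====
theorem delimiter_replacement_test_spec : Claim_equal_delimiter_replacement_test := by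
  intro src_sample tgt_sample src_type tgt_type _
  unfold Spec_delimiter_replacement_test
  exact ports_eq src_sample tgt_sample src_type tgt_type
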